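-- pv_equiv track=rewrite | github.com/magnusjacobsen/nnsc | code/nnsc/network.py | correct_perspective
-- ===== SOURCE A (Python) =====
-- def correct_perspective(policy, player, size):
--   if player == -1:
--     for i in range(0, size - 1):
--       for j in range(i + 1, size):
--         one = i * size + j
--         one_t = j * size + i
--         temp = policy[one]
--         policy[one] = policy[one_t]
--         policy[one_t] = temp
--   return policy
-- ===== SOURCE B (Python) =====
-- def correct_perspective(policy, player, size):
--   # Simpler re-implementation: for player == -1, rebuild the flattened transpose
--   # in one gather and write it back in place (slice assignment keeps identity);
--   # matches A's in-place mutation when len(policy) == size*size.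
--   if player == -1:
--     policy[:] = [policy[(k % size) * size + k // size] for k in range(size * size)]
--   return policy
-- ===== Notes on version B (the rewrite author's own statement) =====
-- stated objective: simpler
-- what changed: Replaces the nested upper-triangle pairwise-swap loops with a single gather that rebuilds the whole flattened transpose and slice-assigns it back in place.
-- outside the precondition, e.g. on correct_perspective([0, 1, 2], -1, 2): A returns [0, 2, 1], B raises IndexError; on correct_perspective([1, 2, 3, 4], -1, -2): A returns [1, 2, 3, 4], B returns [1, 2, 4, 1]
import Mathlib
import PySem

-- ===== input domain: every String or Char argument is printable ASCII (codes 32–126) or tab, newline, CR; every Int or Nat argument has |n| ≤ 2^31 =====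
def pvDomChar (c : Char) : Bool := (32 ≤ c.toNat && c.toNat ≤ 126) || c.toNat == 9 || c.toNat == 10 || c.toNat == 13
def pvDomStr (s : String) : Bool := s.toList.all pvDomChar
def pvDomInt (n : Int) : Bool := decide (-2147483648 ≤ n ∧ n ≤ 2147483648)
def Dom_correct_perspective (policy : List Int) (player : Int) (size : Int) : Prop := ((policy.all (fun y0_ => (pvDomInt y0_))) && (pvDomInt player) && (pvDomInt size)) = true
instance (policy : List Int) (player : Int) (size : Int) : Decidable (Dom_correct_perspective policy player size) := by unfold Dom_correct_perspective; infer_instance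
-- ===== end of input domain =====

-- B rebuilds the flattened transpose in one gather instead of A's nested pairwise-swap loops.
-- Equivalence is about the RETURN value; in Python both A and B mutate `policy` in place
-- (A by element swaps, B by slice assignment), leaving the same final contents on Pre_.

-- ===== PORT A =====
-- one swap iteration of A's inner loop body: temp = policy[one]; policy[one] = policy[one_t]; policy[one_t] = temp
-- (a `none` from pyGet? is Python's IndexError; those inputs are excluded by Pre_, the port then leaves the list unchanged)
def pvSwapStep (pol : List Int) (one one_t : Int) : List Int :=
  match PySem.List.pyGet? pol one with
  | none => pol
  | some temp =>
    match PySem.List.pyGet? pol one_t with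
    | none => pol
    | some v => PySem.List.pySetD (PySem.List.pySetD pol one v) one_t temp

def correct_perspective (policy : List Int) (player : Int) (size : Int) : List Int :=
  if player = -1 then
    (PySem.List.pyRange 0 (size - 1) 1).foldl (fun pol i =>
      (PySem.List.pyRange (i + 1) size 1).foldl (fun pol j =>
        pvSwapStep pol (i * size + j) (j * size + i)) pol) policy
  else policy

-- ===== PORT B =====
-- policy[:] = [policy[(k % size) * size + k // size] for k in range(size * size)]
-- ported as a left-to-right recursion over k (the comprehension's loop); a `none`
-- is Python's IndexError at that k, where the comprehension stops — excluded by Pre_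
def pvGather (policy : List Int) (size : Int) (k : Int) : ℕ → Option (List Int)
  | 0 => some []
  | m + 1 =>
    match PySem.List.pyGet? policy ((PySem.Int.mod k size) * size + PySem.Int.floordiv k size) with
    | none => none
    | some v => (pvGather policy size (k + 1) m).map (v :: ·)

def correct_perspective_alt (policy : List Int) (player : Int) (size : Int) : List Int :=
  if player = -1 then
    (pvGather policy size 0 (size * size).toNat).getD policy
  else policy

-- ===== PRECONDITION & SPEC =====
-- Pre_ excludes player == -1 inputs whose list is not a well-formed flattened size×size matrix
-- (size < 0 or len(policy) ≠ size*size): there A's partial-swap/no-op result is an accident of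
-- its triangle loops (and B raises IndexError or gathers with negative-divisor arithmetic).
def Pre_correct_perspective (policy : List Int) (player : Int) (size : Int) : Prop :=
  player = -1 → (0 ≤ size ∧ (policy.length : Int) = size * size)
instance (policy : List Int) (player : Int) (size : Int) : Decidable (Pre_correct_perspective policy player size) := by unfold Pre_correct_perspective; infer_instance

def pvWitness_correct_perspective : List Int × Int × Int := ([1, 2, 3, 4], -1, 2)

def Spec_correct_perspective (policy : List Int) (player : Int) (size : Int) (out : List Int) : Prop := out = correct_perspective_alt policy player size
instance (policy : List Int) (player : Int) (size : Int) (out : List Int) : Decidable (Spec_correct_perspective policy player size out) := by unfold Spec_correct_perspective; infer_instance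

-- ===== CLAIM (what is proved, stated in full; the proofs are below) =====
def Claim_equal_correct_perspective : Prop := ∀ (policy : List Int) (player : Int) (size : Int), Dom_correct_perspective policy player size → Pre_correct_perspective policy player size → Spec_correct_perspective policy player size (correct_perspective policy player size)

-- ===== LEMMAS AND PROOFS =====

-- the list of (one, one_t) index pairs A swaps, in A's loop order, at Nat level
def pvPairs (n : ℕ) : List (ℕ × ℕ) :=
  (List.range (n - 1)).flatMap (fun i =>
    (List.range (n - 1 - i)).map (fun t => (i * n + (i + 1 + t), (i + 1 + t) * n + i)))

def pvPositions (ps : List (ℕ × ℕ)) : List ℕ := ps.flatMap (fun pr => [pr.1, pr.2])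

def pvSigma (ps : List (ℕ × ℕ)) (p : ℕ) : ℕ :=
  match ps with
  | [] => p
  | (a, b) :: t => if p = a then b else if p = b then a else pvSigma t p

lemma pvSwapStep_length (pol : List Int) (a b : Int) :
    (pvSwapStep pol a b).length = pol.length := by
  unfold pvSwapStep
  cases h1 : PySem.List.pyGet? pol a with
  | none => rfl
  | some temp =>
    cases h2 : PySem.List.pyGet? pol b with
    | none => rfl
    | some v => simp [PySem.List.length_pySetD]

lemma pvSwapStep_getElem? (L : List Int) (a b : ℕ) (ha : a < L.length) (hb : b < L.length)
    (p : ℕ) :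
    (pvSwapStep L (a : Int) (b : Int))[p]? =
      if p = a then L[b]? else if p = b then L[a]? else L[p]? := by
  simp only [pvSwapStep, PySem.List.pyGet?_natCast, List.getElem?_eq_getElem ha,
    List.getElem?_eq_getElem hb, PySem.List.pySetD_natCast]
  rw [List.getElem?_set, List.getElem?_set]
  simp only [List.length_set]
  by_cases h1 : p = a <;> by_cases h2 : p = b
  · subst h1; subst h2; simp [ha]
  · subst h1; simp [Ne.symm h2, ha]
  · subst h2; simp [hb]
    exact fun h => absurd h h1
  · simp [Ne.symm h1, Ne.symm h2, h1, h2]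

lemma pvSigma_not_mem (ps : List (ℕ × ℕ)) (p : ℕ) (h : p ∉ pvPositions ps) :
    pvSigma ps p = p := by
  induction ps with
  | nil => rfl
  | cons pr t ih =>
    obtain ⟨a, b⟩ := pr
    have h1 : p ≠ a := by intro hh; apply h; simp [pvPositions, hh]
    have h2 : p ≠ b := by intro hh; apply h; simp [pvPositions, hh]
    have h3 : p ∉ pvPositions t := by
      intro hh; apply h; simp only [pvPositions] at hh ⊢; simp [List.flatMap_cons]
      right; right; simpa [pvPositions] using hh
    simp [pvSigma, h1, h2, ih h3]

lemma pvSigma_mem (ps : List (ℕ × ℕ)) (p : ℕ) :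
    pvSigma ps p = p ∨ pvSigma ps p ∈ pvPositions ps := by
  induction ps with
  | nil => simp [pvSigma]
  | cons pr t ih =>
    obtain ⟨a, b⟩ := pr
    have hsub : pvPositions t ⊆ pvPositions ((a, b) :: t) := by
      intro x hx; simp only [pvPositions] at hx ⊢; simp [List.flatMap_cons]
      right; right; simpa [pvPositions] using hx
    simp only [pvSigma]
    split_ifs with h1 h2
    · right; simp [pvPositions, List.flatMap_cons]
    · right; simp [pvPositions, List.flatMap_cons]
    · rcases ih with h | h
      · left; exact h
      · right; exact hsub h

lemma pvPositions_cons (a b : ℕ) (t : List (ℕ × ℕ)) :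
    pvPositions ((a, b) :: t) = a :: b :: pvPositions t := by
  simp [pvPositions, List.flatMap_cons]

lemma pvSigma_fst (ps : List (ℕ × ℕ)) (a b : ℕ) (hnd : (pvPositions ps).Nodup)
    (hmem : (a, b) ∈ ps) : pvSigma ps a = b := by
  induction ps with
  | nil => simp at hmem
  | cons pr t ih =>
    obtain ⟨x, y⟩ := pr
    rw [pvPositions_cons] at hnd
    rcases List.mem_cons.mp hmem with h | h
    · obtain ⟨rfl, rfl⟩ := Prod.mk.injEq a b x y ▸ h
      simp [pvSigma]
    · have hamem : a ∈ pvPositions t := by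
        simp only [pvPositions, List.mem_flatMap]; exact ⟨(a, b), h, by simp⟩
      have h1 : a ≠ x := by rintro rfl; exact (List.nodup_cons.mp hnd).1 (by simp [hamem])
      have h2 : a ≠ y := by
        rintro rfl
        exact (List.nodup_cons.mp ((List.nodup_cons.mp hnd).2)).1 hamem
      have hnd' : (pvPositions t).Nodup :=
        (List.nodup_cons.mp ((List.nodup_cons.mp hnd).2)).2
      simp [pvSigma, h1, h2, ih hnd' h]

lemma pvSigma_snd (ps : List (ℕ × ℕ)) (a b : ℕ) (hnd : (pvPositions ps).Nodup)
    (hmem : (a, b) ∈ ps) : pvSigma ps b = a := by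
  induction ps with
  | nil => simp at hmem
  | cons pr t ih =>
    obtain ⟨x, y⟩ := pr
    rw [pvPositions_cons] at hnd
    rcases List.mem_cons.mp hmem with h | h
    · obtain ⟨rfl, rfl⟩ := Prod.mk.injEq a b x y ▸ h
      by_cases hab : b = a <;> simp [pvSigma, hab]
    · have hbmem : b ∈ pvPositions t := by
        simp only [pvPositions, List.mem_flatMap]; exact ⟨(a, b), h, by simp⟩
      have h1 : b ≠ x := by rintro rfl; exact (List.nodup_cons.mp hnd).1 (by simp [hbmem])
      have h2 : b ≠ y := by
        rintro rfl
        exact (List.nodup_cons.mp ((List.nodup_cons.mp hnd).2)).1 hbmem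
      have hnd' : (pvPositions t).Nodup :=
        (List.nodup_cons.mp ((List.nodup_cons.mp hnd).2)).2
      simp [pvSigma, h1, h2, ih hnd' h]

lemma pvFoldSwap_getElem? (ps : List (ℕ × ℕ)) (L : List Int)
    (hin : ∀ pr ∈ ps, pr.1 < L.length ∧ pr.2 < L.length)
    (hnd : (pvPositions ps).Nodup) (p : ℕ) :
    (ps.foldl (fun M pr => pvSwapStep M (pr.1 : Int) (pr.2 : Int)) L)[p]? = L[pvSigma ps p]? := by
  induction ps generalizing L with
  | nil => simp [pvSigma]
  | cons pr t ih =>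
    obtain ⟨a, b⟩ := pr
    rw [pvPositions_cons] at hnd
    have ha : a < L.length := (hin (a, b) (List.mem_cons_self)).1
    have hb : b < L.length := (hin (a, b) (List.mem_cons_self)).2
    have hna : a ∉ pvPositions t := by
      have := (List.nodup_cons.mp hnd).1; intro hh; exact this (by simp [hh])
    have hnb : b ∉ pvPositions t := (List.nodup_cons.mp ((List.nodup_cons.mp hnd).2)).1
    have hab : a ≠ b := by
      intro hh; exact (List.nodup_cons.mp hnd).1 (by simp [hh])
    have hnd' : (pvPositions t).Nodup :=
      (List.nodup_cons.mp ((List.nodup_cons.mp hnd).2)).2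
    have hin' : ∀ q ∈ t, q.1 < (pvSwapStep L (a : Int) (b : Int)).length ∧
        q.2 < (pvSwapStep L (a : Int) (b : Int)).length := by
      intro q hq; rw [pvSwapStep_length]; exact hin q (List.mem_cons_of_mem _ hq)
    rw [List.foldl_cons, ih _ hin' hnd', pvSwapStep_getElem? L a b ha hb]
    by_cases h1 : p = a
    · subst h1
      simp [pvSigma, pvSigma_not_mem t p hna]
    · by_cases h2 : p = b
      · subst h2
        simp [pvSigma, pvSigma_not_mem t p hnb, h1]
      · have hne : pvSigma t p ≠ a ∧ pvSigma t p ≠ b := by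
          rcases pvSigma_mem t p with h | h
          · rw [h]; exact ⟨h1, h2⟩
          · constructor <;> rintro rfl <;> [exact hna h; exact hnb h]
        simp [pvSigma, h1, h2, hne.1, hne.2]

lemma pvFoldl_flatMap {α β σ : Type} (l : List α) (f : α → List β) (g : σ → β → σ) (init : σ) :
    (l.flatMap f).foldl g init = l.foldl (fun acc x => (f x).foldl g acc) init := by
  induction l generalizing init <;> simp [*]

lemma pvIdx_lt {n i j : ℕ} (hi : i < n) (hj : j < n) : i * n + j < n * n := by nlinarith

lemma pvDiv {n i j : ℕ} (hj : j < n) : (i * n + j) / n = i := by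
  have hn : 0 < n := lt_of_le_of_lt (Nat.zero_le _) hj
  rw [Nat.mul_comm i n, Nat.mul_add_div hn, Nat.div_eq_of_lt hj, Nat.add_zero]

lemma pvMod {n i j : ℕ} (hj : j < n) : (i * n + j) % n = j := by
  rw [Nat.mul_comm i n, Nat.mul_add_mod, Nat.mod_eq_of_lt hj]

lemma pvMem_pairs {n i j : ℕ} (hij : i < j) (hj : j < n) : (i * n + j, j * n + i) ∈ pvPairs n := by
  simp only [pvPairs, List.mem_flatMap, List.mem_map, List.mem_range]
  refine ⟨i, by omega, j - (i + 1), by omega, ?_⟩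
  have hjt : i + 1 + (j - (i + 1)) = j := by omega
  rw [hjt]

lemma pvPairs_shape {n : ℕ} {pr : ℕ × ℕ} (h : pr ∈ pvPairs n) :
    ∃ i j, i < j ∧ j < n ∧ pr = (i * n + j, j * n + i) := by
  simp only [pvPairs, List.mem_flatMap, List.mem_map, List.mem_range] at h
  obtain ⟨i, hi, t, ht, rfl⟩ := h
  exact ⟨i, i + 1 + t, by omega, by omega, rfl⟩

lemma pvMem_positions {n q : ℕ} (h : q ∈ pvPositions (pvPairs n)) :
    ∃ i j, i < j ∧ j < n ∧ (q = i * n + j ∨ q = j * n + i) := by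
  simp only [pvPositions, List.mem_flatMap] at h
  obtain ⟨pr, hpr, hq⟩ := h
  obtain ⟨i, j, hij, hj, rfl⟩ := pvPairs_shape hpr
  simp only [List.mem_cons] at hq
  rcases hq with rfl | hq
  · exact ⟨i, j, hij, hj, Or.inl rfl⟩
  · rcases hq with rfl | h'
    · exact ⟨i, j, hij, hj, Or.inr rfl⟩
    · simp at h'

-- decode invariant for one block element
lemma pvBlockElem {n i j q : ℕ} (hij : i < j) (hj : j < n) (h : q = i * n + j ∨ q = j * n + i) :
    min (q / n) (q % n) = i ∧ max (q / n) (q % n) = j := by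
  have hi : i < n := lt_trans hij hj
  rcases h with rfl | rfl
  · rw [pvDiv hj, pvMod hj]
    exact ⟨Nat.min_eq_left (le_of_lt hij), Nat.max_eq_right (le_of_lt hij)⟩
  · rw [pvDiv hi, pvMod hi]
    exact ⟨Nat.min_eq_right (le_of_lt hij), Nat.max_eq_left (le_of_lt hij)⟩

lemma pvNodup (n : ℕ) : (pvPositions (pvPairs n)).Nodup := by
  have hrw : pvPositions (pvPairs n) =
      (List.range (n - 1)).flatMap (fun i =>
        (List.range (n - 1 - i)).flatMap (fun t =>
          [i * n + (i + 1 + t), (i + 1 + t) * n + i])) := by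
    simp only [pvPositions, pvPairs, List.flatMap_assoc]
    congr 1; funext i
    rw [List.flatMap_map]
  rw [hrw, List.nodup_flatMap]
  constructor
  · intro i hi
    rw [List.nodup_flatMap]
    constructor
    · intro t ht
      simp only [List.mem_range] at hi ht
      have hij : i < i + 1 + t := by omega
      have hjn : i + 1 + t < n := by omega
      simp only [List.nodup_cons, List.mem_singleton, List.not_mem_nil, not_false_iff,
        List.nodup_nil, and_true]
      intro hq
      have h1 := pvDiv (i := i) hjn
      have h2 := pvDiv (i := i + 1 + t) (lt_trans hij hjn)
      rw [hq] at h1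
      omega
    · refine List.pairwise_lt_range.imp_of_mem ?_
      intro t t' htm ht'm hlt q hq hq'
      simp only [List.mem_range] at hi htm ht'm
      simp only [List.mem_cons, List.not_mem_nil, or_false] at hq hq'
      have h1 := pvBlockElem (i := i) (j := i + 1 + t) (q := q) (by omega) (by omega) hq
      have h2 := pvBlockElem (i := i) (j := i + 1 + t') (q := q) (by omega) (by omega) hq'
      omega
  · refine List.pairwise_lt_range.imp ?_
    intro i i' hlt q hq hq'
    simp only [List.mem_flatMap, List.mem_range] at hq hq'
    obtain ⟨t, ht, hq⟩ := hq
    obtain ⟨t', ht', hq'⟩ := hq'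
    simp only [List.mem_cons, List.not_mem_nil, or_false] at hq hq'
    have h1 := pvBlockElem (i := i) (j := i + 1 + t) (q := q) (by omega) (by omega) hq
    have h2 := pvBlockElem (i := i') (j := i' + 1 + t') (q := q) (by omega) (by omega) hq'
    omega

lemma pvPositions_lt {n q : ℕ} (h : q ∈ pvPositions (pvPairs n)) : q < n * n := by
  obtain ⟨i, j, hij, hj, hq⟩ := pvMem_positions h
  rcases hq with rfl | rfl
  · exact pvIdx_lt (lt_trans hij hj) hj
  · exact pvIdx_lt hj (lt_trans hij hj)

lemma pvSigma_pairs_eq {n p : ℕ} (hp : p < n * n) :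
    pvSigma (pvPairs n) p = (p % n) * n + p / n := by
  have hn : 0 < n := by
    rcases Nat.eq_zero_or_pos n with h | h
    · subst h; simp at hp
    · exact h
  have hr : p / n < n := (Nat.div_lt_iff_lt_mul hn).mpr hp
  have hc : p % n < n := Nat.mod_lt _ hn
  have hpeq : p = p / n * n + p % n := by
    rw [Nat.mul_comm]; exact (Nat.div_add_mod p n).symm
  rcases lt_trichotomy (p / n) (p % n) with h | h | h
  · have hmem := pvMem_pairs h hc
    have hf := pvSigma_fst (pvPairs n) _ _ (pvNodup n) hmem
    conv_lhs => rw [hpeq]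
    exact hf
  · have hnotin : p ∉ pvPositions (pvPairs n) := by
      intro hin
      obtain ⟨i, j, hij, hj, hq⟩ := pvMem_positions hin
      have := pvBlockElem hij hj hq
      omega
    rw [pvSigma_not_mem _ _ hnotin]
    calc p = p / n * n + p % n := hpeq
      _ = p % n * n + p / n := by rw [h]
  · have hmem := pvMem_pairs h hr
    have hf := pvSigma_snd (pvPairs n) _ _ (pvNodup n) hmem
    conv_lhs => rw [hpeq]
    exact hf

lemma pvGather_some (policy : List Int) (n : ℕ) (hlen : policy.length = n * n) :
    ∀ (m k : ℕ), k + m ≤ n * n →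
    ∃ L : List Int, pvGather policy (n : Int) (k : Int) m = some L ∧ L.length = m ∧
      ∀ t, t < m → L[t]? = policy[(k + t) % n * n + (k + t) / n]? := by
  intro m
  induction m with
  | zero => intro k hk; exact ⟨[], rfl, rfl, by omega⟩
  | succ m ih =>
    intro k hk
    have hn : 0 < n := by
      rcases Nat.eq_zero_or_pos n with h | h
      · subst h; omega
      · exact h
    have hklt : k < n * n := by omega
    have hidx : k % n * n + k / n < n * n :=
      pvIdx_lt (Nat.mod_lt _ hn) ((Nat.div_lt_iff_lt_mul hn).mpr hklt)
    have hidx' : k % n * n + k / n < policy.length := by omega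
    obtain ⟨L, hL, hlenL, hget⟩ := ih (k + 1) (by omega)
    refine ⟨policy[k % n * n + k / n] :: L, ?_, by simp [hlenL], ?_⟩
    · have hidxeq : (PySem.Int.mod (k : Int) (n : Int)) * (n : Int) +
          PySem.Int.floordiv (k : Int) (n : Int) = ((k % n * n + k / n : ℕ) : Int) := by
        rw [PySem.Int.mod_natCast, PySem.Int.floordiv_natCast]; push_cast; ring
      have hcast : ((k : Int) + 1) = ((k + 1 : ℕ) : Int) := by push_cast; ring
      simp only [pvGather, hidxeq, PySem.List.pyGet?_natCast,
        List.getElem?_eq_getElem hidx', hcast, hL, Option.map_some]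
    · intro t ht
      cases t with
      | zero =>
        simp only [List.getElem?_cons_zero, Nat.add_zero]
        exact (List.getElem?_eq_getElem hidx').symm
      | succ t =>
        have harith : k + 1 + t = k + (t + 1) := by omega
        simp only [List.getElem?_cons_succ]
        rw [hget t (by omega), harith]

lemma pvA_fold_eq (policy : List Int) (n : ℕ) :
    (PySem.List.pyRange 0 ((n : Int) - 1) 1).foldl (fun pol i =>
      (PySem.List.pyRange (i + 1) (n : Int) 1).foldl (fun pol j =>
        pvSwapStep pol (i * (n : Int) + j) (j * (n : Int) + i)) pol) policy
    = (pvPairs n).foldl (fun M pr => pvSwapStep M (pr.1 : Int) (pr.2 : Int)) policy := by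
  rw [pvPairs, pvFoldl_flatMap, PySem.List.pyRange_one]
  have houter : ((n : Int) - 1 - 0).toNat = n - 1 := by omega
  rw [houter, List.foldl_map]
  congr 1
  funext pol k
  rw [PySem.List.pyRange_one, List.foldl_map, List.foldl_map]
  have hinner : ((n : Int) - (0 + (k : Int) + 1)).toNat = n - 1 - k := by omega
  rw [hinner]
  congr 1
  funext pol' t
  congr 1 <;> push_cast <;> ring

-- ===== VERDICT (by name: the statement is the Claim_ definition above) =====
theorem correct_perspective_spec : Claim_equal_correct_perspective := by
  intro policy player size hdom hpre
  unfold Spec_correct_perspective correct_perspective correct_perspective_alt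
  by_cases hp : player = -1
  · obtain ⟨hs, hlen⟩ := hpre hp
    rw [if_pos hp, if_pos hp]
    obtain ⟨n, rfl⟩ : ∃ n : ℕ, size = (n : Int) := ⟨size.toNat, (Int.toNat_of_nonneg hs).symm⟩
    have hlenN : policy.length = n * n := by exact_mod_cast hlen
    rw [pvA_fold_eq]
    have hin : ∀ pr ∈ pvPairs n, pr.1 < policy.length ∧ pr.2 < policy.length := by
      intro pr h
      obtain ⟨i, j, hij, hj, rfl⟩ := pvPairs_shape h
      rw [hlenN]
      exact ⟨pvIdx_lt (lt_trans hij hj) hj, pvIdx_lt hj (lt_trans hij hj)⟩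
    have hBrw : (((n : Int) * (n : Int)).toNat) = n * n := by
      have : ((n : Int) * (n : Int)) = ((n * n : ℕ) : Int) := by push_cast; ring
      rw [this, Int.toNat_natCast]
    rw [hBrw]
    obtain ⟨L, hL, hlenL, hget⟩ := pvGather_some policy n hlenN (n * n) 0 (by omega)
    simp only [Nat.cast_zero] at hL
    rw [hL, Option.getD_some]
    apply List.ext_getElem?
    intro p
    rw [pvFoldSwap_getElem? _ _ hin (pvNodup n) p]
    by_cases hpn : p < n * n
    · rw [pvSigma_pairs_eq hpn]
      have := hget p hpn
      simp only [Nat.zero_add] at this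
      rw [this]
    · rw [pvSigma_not_mem _ _ (fun h => hpn (pvPositions_lt h)),
        List.getElem?_eq_none (by omega : policy.length ≤ p),
        List.getElem?_eq_none (by omega : L.length ≤ p)]
  · simp [hp]
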